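-- pv_equiv track=rewrite | github.com/scott2000/answerset | src/__init__.py | remove_bracketed_text
-- ===== SOURCE A (Python) =====
-- from typing import Iterator, Optional
--
-- def find_outer_bracket_ranges(input: Iterator[str], lenient: bool = False) -> list[tuple[int, int]]:
--     found_ranges = []
--     expected_ends = []
--     for i, ch in enumerate(input):
--         if ch == '(':
--             expected_ends.append((i, ')'))
--         elif ch == '[':
--             expected_ends.append((i, ']'))
--         elif ch == ')' or ch == ']':
--             try:
--                 start_index, end_char = expected_ends.pop()
--             except IndexError:
--                 if not lenient:
--                     return []
--
--                 continue
--
--             if end_char != ch: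
--                 return []
--
--             if not expected_ends:
--                 found_ranges.append((start_index, i + 1))
--
--     if expected_ends and not lenient:
--         return []
--
--     return found_ranges
--
-- def remove_bracketed_text(segment: list[str]) -> list[str]:
--     """Remove all bracketed text from a segment."""
--
--     result = []
--     last_end = 0
--     for start, end in find_outer_bracket_ranges(segment, lenient=True):
--         result.extend(segment[last_end:start])
--         last_end = end
--
--     result.extend(segment[last_end:])
--
--     return result
-- ===== SOURCE B (Python) =====
-- def remove_bracketed_text(segment: list[str]) -> list[str]:
--     """Remove all bracketed text from a segment (single pass, no range bookkeeping)."""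
--     result = []
--     buffer = []
--     stack = []
--     for ch in segment:
--         if ch == '(':
--             buffer.append(ch)
--             stack.append(')')
--         elif ch == '[':
--             buffer.append(ch)
--             stack.append(']')
--         elif not stack:
--             result.append(ch)
--         elif ch == ')' or ch == ']':
--             expected = stack.pop()
--             if ch != expected:
--                 return list(segment)
--             if not stack:
--                 buffer = []
--             else:
--                 buffer.append(ch)
--         else:
--             buffer.append(ch)
--     if stack:
--         result += buffer
--     return result
-- ===== Notes on version B (the rewrite author's own statement) =====
-- stated objective: alternative
-- what changed: B removes bracketed regions in one direct pass that builds the output list with a buffer for the current top-level bracketed span, instead of A's two-phase index bookkeeping (compute (start,end) ranges with enumerate, then re-slice the segment by those ranges).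
import Mathlib
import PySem

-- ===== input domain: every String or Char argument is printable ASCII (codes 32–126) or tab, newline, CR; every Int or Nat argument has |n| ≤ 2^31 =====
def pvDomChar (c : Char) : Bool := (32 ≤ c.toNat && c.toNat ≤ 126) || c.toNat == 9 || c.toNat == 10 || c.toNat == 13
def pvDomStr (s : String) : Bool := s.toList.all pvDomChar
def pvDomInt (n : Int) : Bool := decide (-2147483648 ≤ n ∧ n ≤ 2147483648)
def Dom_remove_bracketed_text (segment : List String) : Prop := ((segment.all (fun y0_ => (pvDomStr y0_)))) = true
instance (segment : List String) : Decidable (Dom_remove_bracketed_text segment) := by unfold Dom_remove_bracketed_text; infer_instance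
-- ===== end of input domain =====

-- B replaces A's two-phase range computation + slicing with one direct pass that builds
-- the output list (same cost; a different decomposition, proved to return the same value).

-- ===== PORT A =====
-- the enumerate-loop of find_outer_bracket_ranges; `return []` becomes an immediate result,
-- expected_ends.append/pop (end of list) is modelled by cons/head (the same LIFO stack)
def fobrLoop (rest : List String) (i : Int) (found : List (Int × Int))
    (stack : List (Int × String)) (lenient : Bool) : List (Int × Int) :=
  match rest with
  | [] => if stack ≠ [] ∧ lenient = false then [] else found
  | ch :: rest =>
    if ch = "(" then fobrLoop rest (i + 1) found ((i, ")") :: stack) lenient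
    else if ch = "[" then fobrLoop rest (i + 1) found ((i, "]") :: stack) lenient
    else if ch = ")" ∨ ch = "]" then
      match stack with
      | [] => if lenient = false then [] else fobrLoop rest (i + 1) found [] lenient
      | (s, e) :: tl =>
        if e ≠ ch then []
        else if tl = [] then fobrLoop rest (i + 1) (found ++ [(s, i + 1)]) tl lenient
        else fobrLoop rest (i + 1) found tl lenient
    else fobrLoop rest (i + 1) found stack lenient

def find_outer_bracket_ranges (input : List String) (lenient : Bool) : List (Int × Int) :=
  fobrLoop input 0 [] [] lenient

-- the fold over the ranges: state (result, last_end)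
def rbtFold (segment : List String) (ranges : List (Int × Int)) : List String × Int :=
  ranges.foldl (fun acc r => (acc.1 ++ PySem.List.slice segment (some acc.2) (some r.1), r.2)) ([], 0)

def applyRanges (segment : List String) (ranges : List (Int × Int)) : List String :=
  (rbtFold segment ranges).1 ++ PySem.List.slice segment (some (rbtFold segment ranges).2) none

def remove_bracketed_text (segment : List String) : List String :=
  applyRanges segment (find_outer_bracket_ranges segment true)

-- ===== PORT B =====
-- single pass: result = kept output, buffer = current top-level bracketed span,
-- stack = expected closing brackets (append/pop at end of the Python list = cons/head here)
def rbLoop (segment : List String) (rest : List String) (result buffer : List String)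
    (stack : List String) : List String :=
  match rest with
  | [] => if stack = [] then result else result ++ buffer
  | ch :: rest =>
    if ch = "(" then rbLoop segment rest result (buffer ++ [ch]) (")" :: stack)
    else if ch = "[" then rbLoop segment rest result (buffer ++ [ch]) ("]" :: stack)
    else
      match stack with
      | [] => rbLoop segment rest (result ++ [ch]) buffer []
      | e :: tl =>
        if ch = ")" ∨ ch = "]" then
          if ch ≠ e then segment
          else if tl = [] then rbLoop segment rest result [] []
          else rbLoop segment rest result (buffer ++ [ch]) tl
        else rbLoop segment rest result (buffer ++ [ch]) (e :: tl)

def remove_bracketed_text_alt (segment : List String) : List String :=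
  rbLoop segment segment [] [] []

-- ===== PRECONDITION & SPEC =====
def Spec_remove_bracketed_text (segment : List String) (out : List String) : Prop := out = remove_bracketed_text_alt segment
instance (segment : List String) (out : List String) : Decidable (Spec_remove_bracketed_text segment out) := by unfold Spec_remove_bracketed_text; infer_instance

-- ===== CLAIM (what is proved, stated in full; the proofs are below) =====
def Claim_equal_remove_bracketed_text : Prop := ∀ (segment : List String), Dom_remove_bracketed_text segment → Spec_remove_bracketed_text segment (remove_bracketed_text segment)

-- ===== LEMMAS AND PROOFS =====

-- slice with Nat-cast bounds is drop/take
theorem slice_nn (seg : List String) (a b : Nat) :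
    PySem.List.slice seg (some (a : Int)) (some (b : Int)) = (seg.drop a).take (b - a) :=
  PySem.List.slice_natCast seg a b

-- empty slice
theorem slice_self (seg : List String) (a : Nat) :
    PySem.List.slice seg (some (a : Int)) (some (a : Int)) = [] := by
  simp [slice_nn]

-- extension by one element: segment[a:i+1] = segment[a:i] ++ [segment[i]]  (a ≤ i)
theorem slice_ext (seg : List String) (a i : Nat) (ch : String) (ha : a ≤ i)
    (h : seg[i]? = some ch) :
    PySem.List.slice seg (some (a : Int)) (some ((i : Int) + 1))
      = PySem.List.slice seg (some (a : Int)) (some (i : Int)) ++ [ch] := by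
  have hcast : ((i : Int) + 1) = ((i + 1 : Nat) : Int) := by push_cast; ring
  rw [hcast, slice_nn, slice_nn]
  have h1 : i + 1 - a = (i - a) + 1 := by omega
  rw [h1, List.take_add_one]
  have h2 : (seg.drop a)[i - a]? = seg[i]? := by
    rw [List.getElem?_drop]; congr 1; omega
  rw [h2, h]
  rfl

-- splitting: segment[a:c] = segment[a:b] ++ segment[b:c]  (a ≤ b ≤ c)
theorem slice_split (seg : List String) (a b c : Nat) (hab : a ≤ b) (hbc : b ≤ c) :
    PySem.List.slice seg (some (a : Int)) (some (c : Int))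
      = PySem.List.slice seg (some (a : Int)) (some (b : Int))
        ++ PySem.List.slice seg (some (b : Int)) (some (c : Int)) := by
  rw [slice_nn, slice_nn, slice_nn]
  have h1 : c - a = (b - a) + (c - b) := by omega
  rw [h1, List.take_add]
  congr 2
  rw [List.drop_drop]
  congr 1
  omega

-- tail slice: segment[a:] = segment[a:len]
theorem slice_tail (seg : List String) (a : Nat) :
    PySem.List.slice seg (some (a : Int)) none
      = PySem.List.slice seg (some (a : Int)) (some (seg.length : Int)) := by
  rw [PySem.List.slice_from_natCast, slice_nn]
  rw [List.take_of_length_le (by simp)]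

-- segment[:0] = []
theorem slice_none_zero (seg : List String) : PySem.List.slice seg none (some (0 : Int)) = [] := by
  have h := PySem.List.slice_to_natCast seg 0
  simpa using h

-- the fold over ranges, one appended range
theorem rbtFold_concat (seg : List String) (F : List (Int × Int)) (r : Int × Int) :
    rbtFold seg (F ++ [r])
      = ((rbtFold seg F).1 ++ PySem.List.slice seg (some (rbtFold seg F).2) (some r.1), r.2) := by
  simp [rbtFold, List.foldl_append]

-- getLast? through cons of a nonempty list
theorem getLast?_cons_ne {α : Type} (x : α) (l : List α) (h : l ≠ []) :
    (x :: l).getLast? = l.getLast? := by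
  cases l with
  | nil => exact absurd rfl h
  | cons y ys => simp [List.getLast?_cons_cons]

-- main simulation invariant: A's (found, stack, index) state vs B's (result, buffer, stack)
theorem main_sim (seg : List String) (rest : List String) :
    ∀ (p : List String) (found : List (Int × Int)) (stackA : List (Int × String))
      (result buffer : List String) (leN : Nat),
    seg = p ++ rest →
    (rbtFold seg found).2 = (leN : Int) →
    ((stackA = [] ∧ buffer = [] ∧ leN ≤ p.length ∧
        result = (rbtFold seg found).1
          ++ PySem.List.slice seg (some (leN : Int)) (some (p.length : Int)))
     ∨ (∃ (b : Nat) (e : String), stackA.getLast? = some ((b : Int), e) ∧ leN ≤ b ∧ b ≤ p.length ∧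
        buffer = PySem.List.slice seg (some (b : Int)) (some (p.length : Int)) ∧
        result = (rbtFold seg found).1
          ++ PySem.List.slice seg (some (leN : Int)) (some (b : Int)))) →
    applyRanges seg (fobrLoop rest ((p.length : Nat) : Int) found stackA true)
      = rbLoop seg rest result buffer (stackA.map Prod.snd) := by
  induction rest with
  | nil =>
    intro p found stackA result buffer leN hseg hle hinv
    have hplen : seg.length = p.length := by simp [hseg]
    rcases hinv with ⟨hA, hbuf, hlei, hres⟩ | ⟨b, e, hlast, hleb, hbp, hbuf, hres⟩
    · subst hA hbuf
      simp only [fobrLoop, rbLoop, List.map_nil, ne_eq, not_true_eq_false, false_and, if_false]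
      rw [applyRanges, hle, slice_tail, hplen, hres]
      simp
    · have hAne : stackA ≠ [] := by intro h; simp [h] at hlast
      have hBne : stackA.map Prod.snd ≠ [] := by simpa using hAne
      simp only [fobrLoop, rbLoop, ne_eq]
      rw [if_neg (by simp), if_neg hBne]
      rw [applyRanges, hle, slice_tail, hplen, hres, hbuf,
        slice_split seg leN b p.length hleb hbp, List.append_assoc]
  | cons ch rest IH =>
    intro p found stackA result buffer leN hseg hle hinv
    have hget : seg[p.length]? = some ch := by
      subst hseg
      rw [List.getElem?_append_right (le_refl _)]
      simp
    have hseg' : seg = (p ++ [ch]) ++ rest := by simp [hseg]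
    have hq : (p ++ [ch]).length = p.length + 1 := by simp
    have hqc : ((p.length + 1 : Nat) : Int) = ((p.length : Int) + 1) := by push_cast; ring
    have hcast : ((p.length : Int) + 1) = (((p ++ [ch]).length : Nat) : Int) := by
      rw [hq, hqc]
    by_cases hC1 : ch = "("
    · simp only [fobrLoop, rbLoop, if_pos hC1]
      rw [hcast]
      refine IH (p ++ [ch]) found _ result (buffer ++ [ch]) leN hseg' hle (Or.inr ?_)
      rcases hinv with ⟨hA, hbuf, hlei, hres⟩ | ⟨b, e, hlast, hleb, hbp, hbuf, hres⟩
      · subst hA hbuf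
        refine ⟨p.length, ")", by simp, hlei, by simp, ?_, hres⟩
        rw [hq, hqc, slice_ext seg p.length p.length ch (le_refl _) hget, slice_self]
      · have hAne : stackA ≠ [] := by intro h; simp [h] at hlast
        refine ⟨b, e, by rw [getLast?_cons_ne _ _ hAne]; exact hlast, hleb, by omega, ?_, hres⟩
        rw [hq, hqc, slice_ext seg b p.length ch hbp hget, hbuf]
    · by_cases hC2 : ch = "["
      · simp only [fobrLoop, rbLoop, if_neg hC1, if_pos hC2]
        rw [hcast]
        refine IH (p ++ [ch]) found _ result (buffer ++ [ch]) leN hseg' hle (Or.inr ?_)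
        rcases hinv with ⟨hA, hbuf, hlei, hres⟩ | ⟨b, e, hlast, hleb, hbp, hbuf, hres⟩
        · subst hA hbuf
          refine ⟨p.length, "]", by simp, hlei, by simp, ?_, hres⟩
          rw [hq, hqc, slice_ext seg p.length p.length ch (le_refl _) hget, slice_self]
        · have hAne : stackA ≠ [] := by intro h; simp [h] at hlast
          refine ⟨b, e, by rw [getLast?_cons_ne _ _ hAne]; exact hlast, hleb, by omega, ?_, hres⟩
          rw [hq, hqc, slice_ext seg b p.length ch hbp hget, hbuf]
      · by_cases hC3 : ch = ")" ∨ ch = "]"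
        · cases stackA with
          | nil =>
            rcases hinv with ⟨hA, hbuf, hlei, hres⟩ | ⟨b, e, hlast, hleb, hbp, hbuf, hres⟩
            · subst hbuf
              simp only [fobrLoop, rbLoop, List.map_nil]
              split_ifs
              all_goals try contradiction
              rw [hcast]
              refine IH (p ++ [ch]) found [] (result ++ [ch]) [] leN hseg' hle (Or.inl ?_)
              refine ⟨rfl, rfl, by omega, ?_⟩
              rw [hq, hqc, slice_ext seg leN p.length ch hlei hget, hres, List.append_assoc]
            · simp at hlast
          | cons se tl =>
            rcases hinv with ⟨hA, hbuf, hlei, hres⟩ | ⟨b, e, hlast, hleb, hbp, hbuf, hres⟩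
            · simp at hA
            obtain ⟨s', e'⟩ := se
            by_cases hm : e' = ch
            · by_cases htl : tl = []
              · subst htl
                have hs : s' = (b : Int) ∧ e' = e := by simpa using hlast
                simp only [fobrLoop, rbLoop, List.map_cons, List.map_nil]
                split_ifs
                all_goals try contradiction
                all_goals try (exact absurd hm.symm ‹ch ≠ e'›)
                rw [hcast]
                refine IH (p ++ [ch]) (found ++ [(s', ((p ++ [ch]).length : Int))]) [] result []
                  (p.length + 1) hseg' ?_ (Or.inl ⟨rfl, rfl, by omega, ?_⟩)
                · rw [rbtFold_concat]
                  simp only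
                  rw [hq]
                · rw [rbtFold_concat]
                  simp only
                  rw [hq, slice_self, List.append_nil, hle, hs.1, hres]
              · have hlast' : tl.getLast? = some ((b : Int), e) := by
                  rw [← getLast?_cons_ne (s', e') tl htl]; exact hlast
                have htlB : tl.map Prod.snd ≠ [] := by simpa using htl
                simp only [fobrLoop, rbLoop, List.map_cons]
                split_ifs
                all_goals try contradiction
                all_goals try (exact absurd hm.symm ‹ch ≠ e'›)
                rw [hcast]
                refine IH (p ++ [ch]) found tl result (buffer ++ [ch]) leN hseg' hle
                  (Or.inr ⟨b, e, hlast', hleb, by omega, ?_, hres⟩)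
                rw [hq, hqc, slice_ext seg b p.length ch hbp hget, hbuf]
            · simp only [fobrLoop, rbLoop, List.map_cons]
              split_ifs
              all_goals try (exact absurd (Eq.symm (not_not.mp ‹¬ch ≠ e'›)) hm)
              rw [applyRanges]
              simp only [rbtFold, List.foldl_nil]
              rw [show ((0:Int)) = ((0 : Nat) : Int) by simp, PySem.List.slice_from_natCast]
              simp
        · cases stackA with
          | nil =>
            rcases hinv with ⟨hA, hbuf, hlei, hres⟩ | ⟨b, e, hlast, hleb, hbp, hbuf, hres⟩
            · subst hbuf
              simp only [fobrLoop, rbLoop, List.map_nil]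
              split_ifs
              rw [hcast]
              refine IH (p ++ [ch]) found [] (result ++ [ch]) [] leN hseg' hle (Or.inl ?_)
              refine ⟨rfl, rfl, by omega, ?_⟩
              rw [hq, hqc, slice_ext seg leN p.length ch hlei hget, hres, List.append_assoc]
            · simp at hlast
          | cons se tl =>
            rcases hinv with ⟨hA, hbuf, hlei, hres⟩ | ⟨b, e, hlast, hleb, hbp, hbuf, hres⟩
            · simp at hA
            obtain ⟨s', e'⟩ := se
            simp only [fobrLoop, rbLoop, List.map_cons]
            split_ifs
            rw [hcast]
            refine IH (p ++ [ch]) found ((s', e') :: tl) result (buffer ++ [ch]) leN hseg' hle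
              (Or.inr ⟨b, e, hlast, hleb, by omega, ?_, hres⟩)
            rw [hq, hqc, slice_ext seg b p.length ch hbp hget, hbuf]

-- ===== VERDICT (by name: the statement is the Claim_ definition above) =====
theorem remove_bracketed_text_spec : Claim_equal_remove_bracketed_text := by
  intro segment _hdom
  unfold Spec_remove_bracketed_text remove_bracketed_text remove_bracketed_text_alt
    find_outer_bracket_ranges
  have h := main_sim segment segment [] [] [] [] [] 0 (by simp) (by simp [rbtFold])
    (Or.inl ⟨rfl, rfl, by simp, by simp [rbtFold, slice_none_zero]⟩)
  simpa using h
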